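-- pv_equiv track=rewrite | github.com/jo5huar3/DataPreprocess | src/preprocessing/interpreter_process.py | split_import_blocks
-- ===== SOURCE A (Python) =====
-- from typing import List, Optional, Tuple, Union
--
-- def split_import_blocks(code: str) -> Tuple[List[str], List[str], List[str]]:
--     """
--     Split a Cryptol module into (header, imports_block, body) using a
--     simple heuristic:
--
--       * header  : everything before the first 'import ' line
--       * imports : consecutive import / blank lines
--       * body    : everything after the import block
--     """
--     lines = code.splitlines()
--     header: List[str] = []
--     imports: List[str] = []
--     body: List[str] = []
--
--     in_imports = False
--     seen_import = False
--
--     for line in lines: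
--         stripped = line.lstrip()
--         if stripped.startswith("import "):
--             in_imports = True
--             seen_import = True
--             imports.append(line)
--         elif in_imports and (stripped == "" or stripped.startswith("--")):
--             # keep blank/comment lines inside the import block
--             imports.append(line)
--         elif in_imports and seen_import:
--             # first non-import, non-blank after imports → body
--             body.append(line)
--         else:
--             header.append(line)
--
--     # If we never saw an import, all lines are in header
--     if not seen_import:
--         return lines, [], []
--
--     return header, imports, body
-- ===== SOURCE B (Python) =====
-- from typing import List, Tuple
--
-- def split_import_blocks(code: str) -> Tuple[List[str], List[str], List[str]]:
--     """
--     Same split, different decomposition: locate the first import line, take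
--     everything before it as the header, then classify each remaining line by
--     type (import / blank / comment-only -> imports, otherwise body), with no
--     state flags.
--     """
--     lines = code.splitlines()
--
--     def is_import(line: str) -> bool:
--         return line.lstrip().startswith("import ")
--
--     def keep_in_imports(line: str) -> bool:
--         s = line.lstrip()
--         return s.startswith("import ") or s == "" or s.startswith("--")
--
--     i = next((k for k, l in enumerate(lines) if is_import(l)), None)
--     if i is None:
--         return lines, [], []
--     rest = lines[i:]
--     return (lines[:i],
--             [l for l in rest if keep_in_imports(l)],
--             [l for l in rest if not keep_in_imports(l)])
-- ===== Notes on version B (the rewrite author's own statement) =====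
-- stated objective: simpler
-- what changed: Replaced the stateful flag-driven loop (in_imports/seen_import accumulator) by a stateless decomposition: find the first import line, take the prefix as header, and classify each remaining line by type with two filters.
import Mathlib
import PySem

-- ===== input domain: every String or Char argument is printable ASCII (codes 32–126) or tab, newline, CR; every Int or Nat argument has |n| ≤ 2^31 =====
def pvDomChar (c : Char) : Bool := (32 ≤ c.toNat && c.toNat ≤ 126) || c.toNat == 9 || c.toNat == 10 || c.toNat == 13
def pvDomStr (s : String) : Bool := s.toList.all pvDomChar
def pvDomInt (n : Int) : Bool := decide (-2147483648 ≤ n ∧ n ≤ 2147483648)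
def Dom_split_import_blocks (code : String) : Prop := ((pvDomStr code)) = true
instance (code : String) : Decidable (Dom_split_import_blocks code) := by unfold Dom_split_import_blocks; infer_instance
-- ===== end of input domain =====

-- B replaces A's stateful flag-driven loop by a stateless decomposition
-- (find first import line, prefix = header, classify the rest by type); objective: simpler.

-- ===== PORT A =====
-- state: (header, imports, body, in_imports, seen_import)
def pvStepA (st : List String × List String × List String × Bool × Bool) (line : String) :
    List String × List String × List String × Bool × Bool :=
  let (header, imports, body, in_imports, seen_import) := st
  let stripped := PySem.Str.lstrip line
  if PySem.Str.startswith stripped "import " then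
    (header, imports ++ [line], body, true, true)
  else if in_imports && (stripped == "" || PySem.Str.startswith stripped "--") then
    (header, imports ++ [line], body, in_imports, seen_import)
  else if in_imports && seen_import then
    (header, imports, body ++ [line], in_imports, seen_import)
  else
    (header ++ [line], imports, body, in_imports, seen_import)

def split_import_blocks (code : String) : List String × List String × List String :=
  let lines := PySem.Str.splitlines code
  let st := lines.foldl pvStepA ([], [], [], false, false)
  if !st.2.2.2.2 then (lines, [], [])
  else (st.1, st.2.1, st.2.2.1)

-- ===== PORT B =====
def pvIsImport (line : String) : Bool :=
  PySem.Str.startswith (PySem.Str.lstrip line) "import "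

def pvKeepInImports (line : String) : Bool :=
  let s := PySem.Str.lstrip line
  PySem.Str.startswith s "import " || s == "" || PySem.Str.startswith s "--"

def split_import_blocks_alt (code : String) : List String × List String × List String :=
  let lines := PySem.Str.splitlines code
  match lines.findIdx? pvIsImport with
  | none => (lines, [], [])
  | some i =>
      let rest := lines.drop i
      (lines.take i, rest.filter pvKeepInImports, rest.filter (fun l => !pvKeepInImports l))

-- ===== PRECONDITION & SPEC =====
def Spec_split_import_blocks (code : String) (out : List String × List String × List String) : Prop := out = split_import_blocks_alt code
instance (code : String) (out : List String × List String × List String) : Decidable (Spec_split_import_blocks code out) := by unfold Spec_split_import_blocks; infer_instance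

-- ===== CLAIM (what is proved, stated in full; the proofs are below) =====
def Claim_equal_split_import_blocks : Prop := ∀ (code : String), Dom_split_import_blocks code → Spec_split_import_blocks code (split_import_blocks code)

-- ===== LEMMAS AND PROOFS =====

-- an import line is kept in the imports block
theorem keep_of_import (l : String) (h : pvIsImport l = true) : pvKeepInImports l = true := by
  simp [pvIsImport] at h
  simp [pvKeepInImports, h]

-- A's loop step, re-expressed through B's two predicates
theorem pvStepA_eq (h imp b : List String) (ii si : Bool) (l : String) :
    pvStepA (h, imp, b, ii, si) l =
      if pvIsImport l then (h, imp ++ [l], b, true, true)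
      else if ii && pvKeepInImports l then (h, imp ++ [l], b, ii, si)
      else if ii && si then (h, imp, b ++ [l], ii, si)
      else (h ++ [l], imp, b, ii, si) := by
  by_cases h1 : PySem.Chars.startswith (PySem.Chars.lstrip l.toList) ['i','m','p','o','r','t',' '] = true <;>
    by_cases h2 : PySem.Str.lstrip l = "" <;>
      by_cases h3 : PySem.Chars.startswith (PySem.Chars.lstrip l.toList) ['-','-'] = true <;>
        cases ii <;> cases si <;>
          simp [pvStepA, pvIsImport, pvKeepInImports, h1, h2, h3]

-- once both flags are set, each line goes to imports or body by type alone
theorem fold_after (ls : List String) (h imp b : List String) :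
    ls.foldl pvStepA (h, imp, b, true, true) =
      (h, imp ++ ls.filter pvKeepInImports,
          b ++ ls.filter (fun l => !pvKeepInImports l), true, true) := by
  induction ls generalizing imp b with
  | nil => simp
  | cons l ls ih =>
      by_cases hk : pvKeepInImports l = true
      · by_cases hi : pvIsImport l = true <;>
          simp [List.foldl_cons, pvStepA_eq, hi, hk, ih]
      · have hi : pvIsImport l = false := by
          by_contra hc
          exact hk (keep_of_import l (by simpa using hc))
        simp [List.foldl_cons, pvStepA_eq, hi, hk, ih]

-- full characterization of A's fold from a header-only state
theorem fold_char (ls : List String) (h : List String) :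
    ls.foldl pvStepA (h, [], [], false, false) =
      match ls.findIdx? pvIsImport with
      | none => (h ++ ls, [], [], false, false)
      | some i => (h ++ ls.take i, (ls.drop i).filter pvKeepInImports,
                    (ls.drop i).filter (fun l => !pvKeepInImports l), true, true) := by
  induction ls generalizing h with
  | nil => simp
  | cons l ls ih =>
      by_cases hi : pvIsImport l = true
      · simp [List.foldl_cons, pvStepA_eq, hi, fold_after, List.findIdx?_cons,
              keep_of_import l hi]
      · rw [List.foldl_cons, pvStepA_eq]
        simp only [hi, Bool.false_and, Bool.false_eq_true, if_false]
        rw [ih (h ++ [l])]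
        cases hf : ls.findIdx? pvIsImport with
        | none => simp [List.findIdx?_cons, hi, hf]
        | some i =>
            simp [List.findIdx?_cons, hi, hf, List.take_succ_cons, List.drop_succ_cons]

-- ===== VERDICT (by name: the statement is the Claim_ definition above) =====
theorem split_import_blocks_spec : Claim_equal_split_import_blocks := by
  intro code _
  unfold Spec_split_import_blocks split_import_blocks split_import_blocks_alt
  dsimp only
  rw [fold_char (PySem.Str.splitlines code) []]
  cases hf : (PySem.Str.splitlines code).findIdx? pvIsImport <;> simp
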